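-- pv_equiv track=rewrite | github.com/aglvetik/MediaConvector | app/infrastructure/providers/music/internet_archive_music_provider.py | _normalize_length
-- ===== SOURCE A (Python) =====
-- def _normalize_length(value: object) -> int | None:
--     if isinstance(value, int):
--         return value
--     if isinstance(value, str):
--         stripped = value.strip()
--         if stripped.isdigit():
--             return int(stripped)
--         parts = stripped.split(":")
--         if all(part.isdigit() for part in parts):
--             total = 0
--             for part in parts:
--                 total = total * 60 + int(part)
--             return total
--     return None
-- ===== SOURCE B (Python) =====
-- def _normalize_length(value):
--     if isinstance(value, int):
--         return value
--     if not isinstance(value, str):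
--         return None
--     return _seconds(value.strip())
--
--
-- def _seconds(s):
--     # recurse from the right: peel the last ':'-separated component off with
--     # rpartition instead of building a list of parts and looping over it
--     head, sep, last = s.rpartition(":")
--     if not last.isdigit():
--         return None
--     if not sep:
--         return int(last)
--     rest = _seconds(head)
--     return None if rest is None else rest * 60 + int(last)
-- ===== Notes on version B (the rewrite author's own statement) =====
-- stated objective: alternative
-- what changed: B never builds the list of parts or loops over it: it recurses from the right, using rpartition on the colon separator to peel off the last component, parse it, and combine it with the recursively parsed head (rest * 60 + int(last)); the plain-digit string is the no-separator base case, so A's early-return digit branch and its split-then-fold loop both disappear.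
import Mathlib
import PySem

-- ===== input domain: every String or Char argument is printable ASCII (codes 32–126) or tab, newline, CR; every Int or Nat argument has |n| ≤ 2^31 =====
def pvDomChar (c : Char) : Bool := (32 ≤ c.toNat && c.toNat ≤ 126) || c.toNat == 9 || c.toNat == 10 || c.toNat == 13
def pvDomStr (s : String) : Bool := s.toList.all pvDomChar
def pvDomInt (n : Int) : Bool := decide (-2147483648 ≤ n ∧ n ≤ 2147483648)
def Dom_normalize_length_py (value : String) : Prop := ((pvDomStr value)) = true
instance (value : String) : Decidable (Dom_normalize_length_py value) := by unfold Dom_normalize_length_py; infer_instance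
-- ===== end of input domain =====

-- B replaces A's split-into-a-list-then-loop with a right-to-left recursion: rpartition peels the
-- last ':'-component off and the head is parsed recursively (objective: alternative decomposition).

-- ===== PORT A =====
-- int(part) is ported as PySem.Int.ofStr?; a ValueError would propagate as none, so the loop is an
-- Option-valued fold (the isdigit guards in fact make every int() call succeed on the ASCII domain).
def normalize_length_py (value : String) : Option Int :=
  let stripped := PySem.Str.strip value
  if PySem.Str.strIsdigit stripped then
    PySem.Int.ofStr? stripped
  else
    let parts := (PySem.Str.split? stripped ":").getD []
    if parts.all PySem.Str.strIsdigit then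
      List.foldlM (fun total part => (PySem.Int.ofStr? part).map (fun n => total * 60 + n))
        (0 : Int) parts
    else
      none

-- ===== PORT B =====
-- s.rpartition(":") is ported by hand (PySem has no rpartition): scanning s.reverse, takeWhile (≠ ':')
-- is the reversed last component and dropWhile's tail is the reversed head; an empty dropWhile is
-- Python's sep == '' case. int(last) is PySem.Int.ofStr? (never none after isdigit on ASCII input).
def pvSeconds (s : List Char) : Option Int :=
  match hrest : s.reverse.dropWhile (fun c => c ≠ ':') with
  | [] =>      -- no ':' in s: rpartition gives last = s, sep = ''
      if PySem.Chars.strIsdigit s then PySem.Int.ofStr? (String.ofList s) else none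
  | _ :: headRev =>
      let last := (s.reverse.takeWhile (fun c => c ≠ ':')).reverse
      if PySem.Chars.strIsdigit last then
        match pvSeconds headRev.reverse with
        | none => none
        | some rest => (PySem.Int.ofStr? (String.ofList last)).map (fun n => rest * 60 + n)
      else none
termination_by s.length
decreasing_by
  have h := (List.dropWhile_sublist (l := s.reverse) (p := fun c => c ≠ ':')).length_le
  rw [hrest] at h
  simp at h ⊢
  omega

def normalize_length_py_alt (value : String) : Option Int :=
  pvSeconds (PySem.Str.strip value).toList

-- ===== PRECONDITION & SPEC =====
def Spec_normalize_length_py (value : String) (out : Option Int) : Prop := out = normalize_length_py_alt value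
instance (value : String) (out : Option Int) : Decidable (Spec_normalize_length_py value out) := by unfold Spec_normalize_length_py; infer_instance

-- ===== CLAIM (what is proved, stated in full; the proofs are below) =====
def Claim_equal_normalize_length_py : Prop := ∀ (value : String), Dom_normalize_length_py value → Spec_normalize_length_py value (normalize_length_py value)

-- ===== LEMMAS AND PROOFS =====

-- a simple structural recursion computing split(":") , used to mediate between the two ports
def sSplit : List Char → List (List Char)
  | [] => [[]]
  | c :: rest =>
      if c = ':' then [] :: sSplit rest
      else
        match sSplit rest with
        | [] => [[c]]
        | p :: ps => (c :: p) :: ps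

theorem sSplit_ne_nil (s : List Char) : sSplit s ≠ [] := by
  cases s with
  | nil => simp [sSplit]
  | cons c rest =>
    simp only [sSplit]
    split_ifs
    · simp
    · cases h : sSplit rest <;> simp

-- prepend chars onto the first piece
def consHead (pre : List Char) : List (List Char) → List (List Char)
  | [] => [pre]
  | p :: ps => (pre ++ p) :: ps

theorem go_eq_sSplit (l : List Char) : ∀ (fuel : Nat) (cur : List Char) (acc : List (List Char)),
    l.length + 1 ≤ fuel →
    PySem.Chars.splitOn.go [':'] fuel l cur acc = acc.reverse ++ consHead cur.reverse (sSplit l) := by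
  induction l with
  | nil =>
    intro fuel cur acc hf
    cases fuel with
    | zero => omega
    | succ f => simp [PySem.Chars.splitOn.go, sSplit, consHead]
  | cons c rest ih =>
    intro fuel cur acc hf
    cases fuel with
    | zero => simp at hf
    | succ f =>
      rw [PySem.Chars.splitOn.go]
      by_cases hc : c = ':'
      · have hpre : List.isPrefixOf [':'] (c :: rest) = true := by
          simp [List.isPrefixOf, hc]
        rw [hpre]
        simp only [if_true]
        have : List.drop (List.length [':']) (c :: rest) = rest := by simp
        rw [this, ih f [] (List.reverse cur :: acc) (by simp at hf; omega)]
        simp [sSplit, hc, consHead]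
        cases h : sSplit rest with
        | nil => exact absurd h (sSplit_ne_nil rest)
        | cons p ps => simp
      · have hpre : List.isPrefixOf [':'] (c :: rest) = false := by
          simp [List.isPrefixOf]
          exact fun e => hc e.symm
        rw [hpre]
        simp only [Bool.false_eq_true, if_false]
        rw [ih f (c :: cur) acc (by simp at hf ⊢; omega)]
        simp only [sSplit, hc, if_false, List.reverse_cons]
        cases h : sSplit rest with
        | nil => exact absurd h (sSplit_ne_nil rest)
        | cons p ps => simp [consHead]

theorem splitOn_eq_sSplit (s : List Char) : PySem.Chars.splitOn s [':'] = sSplit s := by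
  rw [PySem.Chars.splitOn, go_eq_sSplit s (s.length + 1) [] [] (le_refl _)]
  cases h : sSplit s with
  | nil => exact absurd h (sSplit_ne_nil s)
  | cons p ps => simp [consHead]

theorem sSplit_no_colon (s : List Char) (h : ∀ c ∈ s, c ≠ ':') : sSplit s = [s] := by
  induction s with
  | nil => rfl
  | cons c rest ih =>
    simp only [sSplit]
    rw [if_neg (h c (by simp)), ih (fun x hx => h x (by simp [hx]))]

theorem sSplit_append_colon (head last : List Char) (h : ':' ∉ last) :
    sSplit (head ++ ':' :: last) = sSplit head ++ [last] := by
  induction head with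
  | nil =>
    simp only [List.nil_append, sSplit]
    rw [sSplit_no_colon last (fun c hc he => h (he ▸ hc))]
    rfl
  | cons c rest ih =>
    simp only [List.cons_append, sSplit]
    by_cases hc : c = ':'
    · simp [hc, ih]
    · rw [if_neg hc, if_neg hc, ih]
      cases hr : sSplit rest with
      | nil => exact absurd hr (sSplit_ne_nil rest)
      | cons p ps => simp

-- A's string-side computation, expressed over char-list parts
def G (parts : List (List Char)) : Option Int :=
  if parts.all PySem.Chars.strIsdigit then
    (parts.mapM (fun p => PySem.Int.ofStr? (String.ofList p))).map
      (List.foldl (fun a n => a * 60 + n) 0)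
  else none

theorem mapM_append_single (f : List Char → Option Int) (l : List (List Char)) (p : List Char) :
    List.mapM f (l ++ [p]) =
      (List.mapM f l).bind (fun ns => (f p).map (fun n => ns ++ [n])) := by
  induction l with
  | nil => cases h : f p <;> simp [List.mapM_cons, h, Option.bind]
  | cons a l ih =>
    simp only [List.cons_append, List.mapM_cons, ih]
    cases h : f a <;> cases hm : List.mapM f l <;> cases h2 : f p <;> simp [Option.bind]

theorem pvSeconds_eq_G (n : Nat) : ∀ (s : List Char), s.length ≤ n → pvSeconds s = G (sSplit s) := by
  induction n with
  | zero =>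
    intro s hs
    have : s = [] := by cases s <;> simp_all
    subst this
    have hfalse : PySem.Chars.strIsdigit ([] : List Char) = false := by decide
    simp [pvSeconds, G, sSplit, hfalse]
  | succ n ih =>
    intro s hs
    rw [pvSeconds]
    split
    next hrest =>
      have htake : s.reverse.takeWhile (fun c => c ≠ ':') = s.reverse := by
        have := List.takeWhile_append_dropWhile (p := fun c => c ≠ ':') (l := s.reverse)
        rw [hrest] at this; simpa using this
      have hnc : ∀ c ∈ s, c ≠ ':' := by
        intro c hc
        have : c ∈ s.reverse.takeWhile (fun c => c ≠ ':') := by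
          rw [htake]; simpa using hc
        have := List.mem_takeWhile_imp this
        simpa using this
      rw [sSplit_no_colon s hnc]
      simp only [G, List.all_cons, List.all_nil, Bool.and_true, List.mapM_cons, List.mapM_nil]
      cases h : PySem.Chars.strIsdigit s <;>
        cases h2 : PySem.Int.ofStr? (String.ofList s) <;>
          simp [List.foldl]
    next c headRev hrest =>
      -- c fails the predicate, so c = ':'
      have hc : c = ':' := by
        have := List.head_dropWhile_not (p := fun c => c ≠ ':') (l := s.reverse)
        rw [hrest] at this
        simpa using this (by simp)
      have hdecomp : s = headRev.reverse ++ ':' :: (s.reverse.takeWhile (fun c => c ≠ ':')).reverse := by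
        have h1 := List.takeWhile_append_dropWhile (p := fun c => c ≠ ':') (l := s.reverse)
        rw [hrest, hc] at h1
        calc s = s.reverse.reverse := by simp
          _ = (s.reverse.takeWhile (fun c => c ≠ ':') ++ ':' :: headRev).reverse := by rw [h1]
          _ = _ := by simp
      have hlast_nc : ':' ∉ (s.reverse.takeWhile (fun c => c ≠ ':')).reverse := by
        intro hmem
        have : (':' : Char) ∈ s.reverse.takeWhile (fun c => c ≠ ':') := by simpa using hmem
        have := List.mem_takeWhile_imp this
        simp at this
      have hsplit : sSplit s = sSplit headRev.reverse ++ [(s.reverse.takeWhile (fun c => c ≠ ':')).reverse] := by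
        conv_lhs => rw [hdecomp]
        exact sSplit_append_colon _ _ hlast_nc
      have hlen : headRev.reverse.length ≤ n := by
        have h := (List.dropWhile_sublist (l := s.reverse) (p := fun c => c ≠ ':')).length_le
        rw [hrest] at h
        simp at h ⊢
        omega
      rw [ih headRev.reverse hlen, hsplit]
      set lastp := (s.reverse.takeWhile (fun c => c ≠ ':')).reverse with hlp
      simp only [G, List.all_append, List.all_cons, List.all_nil, Bool.and_true]
      rw [mapM_append_single]
      cases hdl : PySem.Chars.strIsdigit lastp with
      | false =>
        simp only [Bool.and_false, Bool.false_eq_true, if_false]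
      | true =>
        simp only [Bool.and_true]
        cases hall : (sSplit headRev.reverse).all PySem.Chars.strIsdigit with
        | false => simp
        | true =>
          simp only [if_true]
          cases hm : List.mapM (fun p => PySem.Int.ofStr? (String.ofList p)) (sSplit headRev.reverse) with
          | none => simp
          | some ns =>
            cases h2 : PySem.Int.ofStr? (String.ofList lastp) <;>
              simp [Option.bind, List.foldl_append]

-- A's Option-valued Horner fold equals mapM-then-fold
theorem foldlM_eq_mapM (parts : List String) : ∀ (t : Int),
    List.foldlM (fun total part => (PySem.Int.ofStr? part).map (fun n => total * 60 + n)) t parts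
      = (List.mapM PySem.Int.ofStr? parts).map (List.foldl (fun a n => a * 60 + n) t) := by
  induction parts with
  | nil => intro t; simp
  | cons p ps ih =>
    intro t
    rw [List.foldlM_cons, List.mapM_cons]
    cases h : PySem.Int.ofStr? p with
    | none => simp
    | some n =>
      simp only [Option.map_some, Option.bind_some, bind, Option.bind_some]
      rw [ih (t * 60 + n)]
      cases hm : List.mapM PySem.Int.ofStr? ps <;> simp [List.foldl]

theorem mapM_map_ofList (l : List (List Char)) :
    List.mapM PySem.Int.ofStr? (l.map String.ofList)
      = List.mapM (fun p => PySem.Int.ofStr? (String.ofList p)) l := by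
  induction l with
  | nil => rfl
  | cons a l ih => simp [List.mapM_cons, ih]

-- A's body, rewritten through G
theorem A_eq_G (s : String) :
    (if PySem.Str.strIsdigit s then PySem.Int.ofStr? s
     else
       let parts := (PySem.Str.split? s ":").getD []
       if parts.all PySem.Str.strIsdigit then
         List.foldlM (fun total part => (PySem.Int.ofStr? part).map (fun n => total * 60 + n))
           (0 : Int) parts
       else none)
    = G (sSplit s.toList) := by
  by_cases hd : PySem.Str.strIsdigit s
  · have hnc : ∀ c ∈ s.toList, c ≠ ':' := by
      have hd' : PySem.Chars.strIsdigit s.toList = true := by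
        rw [← PySem.Str.strIsdigit_eq]; exact hd
      rw [PySem.Chars.strIsdigit] at hd'
      intro c hc he
      have hall := (List.all_eq_true.mp (Bool.and_elim_right hd')) c hc
      rw [he] at hall
      exact absurd hall (by decide)
    rw [if_pos hd, sSplit_no_colon s.toList hnc]
    have hd' : PySem.Chars.strIsdigit s.toList = true := by
      rw [← PySem.Str.strIsdigit_eq]; exact hd
    simp only [G, List.all_cons, List.all_nil, Bool.and_true, hd', if_true,
      List.mapM_cons, List.mapM_nil]
    rw [String.ofList_toList]
    cases h2 : PySem.Int.ofStr? s <;> simp [List.foldl]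
  · rw [if_neg hd]
    have hsplit : PySem.Str.split? s ":" = some ((sSplit s.toList).map String.ofList) := by
      rw [PySem.Str.split?]
      have hsep : (":" : String).toList = [':'] := rfl
      rw [hsep, PySem.Chars.split?]
      simp [splitOn_eq_sSplit]
    rw [hsplit]
    simp only [Option.getD_some]
    have hall : ((sSplit s.toList).map String.ofList).all PySem.Str.strIsdigit
        = (sSplit s.toList).all PySem.Chars.strIsdigit := by
      rw [List.all_map]
      congr 1
      funext p
      simp [PySem.Str.strIsdigit_eq]
    rw [hall]
    by_cases ha : (sSplit s.toList).all PySem.Chars.strIsdigit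
    · rw [if_pos ha]
      simp only [G, ha, if_true]
      rw [foldlM_eq_mapM]
      rw [mapM_map_ofList]
    · rw [if_neg ha]
      simp [G, ha]



theorem ports_agree (value : String) :
    normalize_length_py value = normalize_length_py_alt value := by
  unfold normalize_length_py normalize_length_py_alt
  rw [pvSeconds_eq_G (PySem.Str.strip value).toList.length _ (le_refl _)]
  exact A_eq_G (PySem.Str.strip value)

-- ===== VERDICT (by name: the statement is the Claim_ definition above) =====
theorem normalize_length_py_spec : Claim_equal_normalize_length_py := by
  intro value _
  unfold Spec_normalize_length_py
  exact ports_agree value
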